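-- pv_equiv track=rewrite | github.com/JSHWJ/algorithm | 프로그래머스/0/120835. 진료 순서 정하기/진료 순서 정하기.py | solution
-- ===== SOURCE A (Python) =====
-- def solution(emergency):
--     answer = []
--
--     emergency_sorted = sorted(emergency, reverse = True)
--
--     for a in range(len(emergency)):
--         for i in range(len(emergency_sorted)):
--             if emergency[a] == emergency_sorted[i]:
--                 answer.append(i+1)
--
--     return answer
-- ===== SOURCE B (Python) =====
-- def solution(emergency):
--     answer = []
--     for x in emergency:
--         g = 0
--         c = 0
--         for y in emergency:
--             if y > x:
--                 g += 1
--             elif y == x: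
--                 c += 1
--         answer.extend(range(g + 1, g + c + 1))
--     return answer
-- ===== Notes on version B (the rewrite author's own statement) =====
-- stated objective: alternative
-- what changed: B drops the sort and the scan over the sorted list entirely: for each element it counts the strictly-greater elements g and the equal elements c in one pass and emits the consecutive rank block range(g+1, g+c+1), which equals the list of 1-based positions of that value in the descending sort.
import Mathlib
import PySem

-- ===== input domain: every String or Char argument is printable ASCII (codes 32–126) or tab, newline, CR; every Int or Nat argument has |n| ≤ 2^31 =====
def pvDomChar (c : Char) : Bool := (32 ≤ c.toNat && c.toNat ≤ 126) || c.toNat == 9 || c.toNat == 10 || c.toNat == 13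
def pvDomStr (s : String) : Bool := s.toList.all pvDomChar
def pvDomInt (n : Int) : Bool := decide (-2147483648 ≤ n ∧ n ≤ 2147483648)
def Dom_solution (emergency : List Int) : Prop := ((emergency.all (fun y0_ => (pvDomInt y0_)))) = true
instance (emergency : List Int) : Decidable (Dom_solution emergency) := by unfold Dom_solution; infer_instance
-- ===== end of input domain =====

-- B replaces A's sort-then-scan by per-element counting of greater/equal elements; objective: alternative (same asymptotic cost).

-- ===== PORT A =====
def solution (emergency : List Int) : List Int :=
  let emergency_sorted := PySem.List.sorted emergency (fun x => x) (reverse := true)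
  (PySem.List.pyRange 0 (emergency.length : Int) 1).foldl (fun answer a =>
    (PySem.List.pyRange 0 (emergency_sorted.length : Int) 1).foldl (fun answer i =>
      if PySem.List.pyGetD emergency a 0 = PySem.List.pyGetD emergency_sorted i 0
      then answer ++ [i + 1] else answer) answer) []

-- ===== PORT B =====
def solution_alt (emergency : List Int) : List Int :=
  emergency.foldl (fun answer x =>
    let gc := emergency.foldl (fun s y =>
      if y > x then (s.1 + 1, s.2) else if y = x then (s.1, s.2 + 1) else s)
      ((0 : Int), (0 : Int))
    answer ++ PySem.List.pyRange (gc.1 + 1) (gc.1 + gc.2 + 1) 1) []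

-- ===== PRECONDITION & SPEC =====
def Spec_solution (emergency : List Int) (out : List Int) : Prop := out = solution_alt emergency
instance (emergency : List Int) (out : List Int) : Decidable (Spec_solution emergency out) := by unfold Spec_solution; infer_instance

-- ===== CLAIM (what is proved, stated in full; the proofs are below) =====
def Claim_equal_solution : Prop := ∀ (emergency : List Int), Dom_solution emergency → Spec_solution emergency (solution emergency)

-- ===== LEMMAS AND PROOFS =====

theorem pv_map_succ_range' (s n : Nat) : (List.range' s n).map Nat.succ = List.range' (s + 1) n := by
  induction n generalizing s with
  | zero => simp
  | succ n ih => simp [List.range'_succ, ih]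

-- In a descending-sorted list, the indices holding value x form the contiguous block
-- starting at (number of elements > x) of length (number of copies of x).
theorem pv_block (es : List Int) (x : Int) (h : es.Pairwise (· ≥ ·)) :
    (List.range es.length).filter (fun i => decide (es.getD i 0 = x))
      = List.range' (es.countP (fun y => decide (x < y))) (es.count x) := by
  induction es with
  | nil => simp
  | cons a t ih =>
    rw [List.pairwise_cons] at h
    obtain ⟨ha, ht⟩ := h
    have ih' := ih ht
    rw [List.length_cons, List.range_succ_eq_map, List.filter_cons, List.filter_map]
    have hcomp : ((fun i => decide (List.getD (a :: t) i 0 = x)) ∘ Nat.succ)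
        = fun i => decide (List.getD t i 0 = x) := by
      funext i; simp [Function.comp]
    rw [hcomp, ih']
    rcases lt_trichotomy a x with hlt | heq | hgt
    · have hct : t.count x = 0 := by
        rw [List.count_eq_zero]; intro hx
        exact absurd (ha x hx) (by omega)
      have hcp : t.countP (fun y => decide (x < y)) = 0 := by
        rw [List.countP_eq_zero]; intro y hy
        have := ha y hy; simp; omega
      simp [hct, hcp, show ¬ a = x from by omega,
        show ¬ x < a from by omega]
    · subst heq
      have hcp : t.countP (fun y => decide (a < y)) = 0 := by
        rw [List.countP_eq_zero]; intro y hy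
        have := ha y hy; simp; omega
      simp [hcp, pv_map_succ_range', List.range'_succ]
    · have hne : a ≠ x := by omega
      simp [hne, hgt, pv_map_succ_range']

-- B's inner loop computes (count of strictly greater, count of equal).
theorem pv_gc (x : Int) (l : List Int) :
    l.foldl (fun s y => if y > x then (s.1 + 1, s.2) else if y = x then (s.1, s.2 + 1) else s)
      ((0 : Int), (0 : Int))
    = ((l.countP (fun y => decide (x < y)) : Int), (l.count x : Int)) := by
  have hb : (fun (s : Int × Int) (y : Int) =>
      if y > x then (s.1 + 1, s.2) else if y = x then (s.1, s.2 + 1) else s)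
      = fun s y => ((if x < y then s.1 + 1 else s.1), (if y = x then s.2 + 1 else s.2)) := by
    funext s y
    by_cases h1 : x < y
    · simp [gt_iff_lt, h1]; omega
    · by_cases h2 : y = x <;> simp [gt_iff_lt, h1, h2]
  rw [hb, PySem.List.foldl_prod_mk (f := fun s y => if x < y then s + 1 else s)
        (g := fun s y => if y = x then s + 1 else s),
      PySem.List.foldl_ite_add_one, PySem.List.foldl_ite_add_one]
  simp [List.count_eq_countP]
  refine List.countP_congr fun a _ => ?_
  simp

-- The 1-based positions of x in the descending sort, as produced by A's inner loop,
-- equal B's range block.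
theorem pv_segment (es : List Int) (x : Int) (h : es.Pairwise (· ≥ ·)) :
    ((PySem.List.pyRange 0 (es.length : Int) 1).filter
        (fun i => decide (x = PySem.List.pyGetD es i 0))).map (· + 1)
    = PySem.List.pyRange ((es.countP (fun y => decide (x < y)) : Int) + 1)
        ((es.countP (fun y => decide (x < y)) : Int) + (es.count x : Int) + 1) 1 := by
  rw [PySem.List.pyRange_zero_nat, List.filter_map]
  have hcomp : ((fun i => decide (x = PySem.List.pyGetD es i 0)) ∘ (fun k : Nat => (k : Int)))
      = fun k => decide (es.getD k 0 = x) := by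
    funext k; simp [Function.comp, eq_comm]
  rw [hcomp, pv_block es x h, PySem.List.pyRange_one]
  set gN := es.countP (fun y => decide (x < y)) with hg
  set cN := es.count x with hc
  have h1 : ((gN : Int) + (cN : Int) + 1 - ((gN : Int) + 1)).toNat = cN := by omega
  rw [h1, List.range'_eq_map_range, List.map_map, List.map_map]
  apply List.map_congr_left
  intro k _
  simp [Function.comp]
  ring

-- ===== VERDICT (by name: the statement is the Claim_ definition above) =====
theorem solution_spec : Claim_equal_solution := by
  intro emergency _
  unfold Spec_solution solution solution_alt
  have hpair : (PySem.List.sorted emergency (fun x => x) true).Pairwise (· ≥ ·) :=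
    PySem.List.sorted_pairwise_rev emergency (fun x => x)
  have hperm : (PySem.List.sorted emergency (fun x => x) true).Perm emergency :=
    PySem.List.sorted_perm emergency (fun x => x) true
  show (PySem.List.pyRange 0 (emergency.length : Int) 1).foldl (fun answer a =>
    (PySem.List.pyRange 0 ((PySem.List.sorted emergency (fun x => x) true).length : Int) 1).foldl
      (fun answer i =>
        if PySem.List.pyGetD emergency a 0
            = PySem.List.pyGetD (PySem.List.sorted emergency (fun x => x) true) i 0
        then answer ++ [i + 1] else answer) answer) [] = _
  rw [PySem.List.foldl_pyRange_zero_pyGetD' emergency 0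
    (fun answer x =>
      (PySem.List.pyRange 0 ((PySem.List.sorted emergency (fun x => x) true).length : Int) 1).foldl
        (fun answer i =>
          if x = PySem.List.pyGetD (PySem.List.sorted emergency (fun x => x) true) i 0
          then answer ++ [i + 1] else answer) answer) []]
  apply PySem.List.foldl_congr_mem
  intro acc x _
  rw [PySem.List.foldl_append_ite
        (p := fun i => x = PySem.List.pyGetD (PySem.List.sorted emergency (fun x => x) true) i 0)
        (f := fun i => i + 1),
      pv_segment _ x hpair, pv_gc x emergency,
      hperm.countP_eq, hperm.count_eq]
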